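-- pv_equiv track=rewrite | github.com/miliar/Code_Jam_Webscraper | solutions_python/Problem_138/768.py | calc_dwar
-- ===== SOURCE A (Python) =====
-- def calc_dwar(n, a_blocks, b_blocks):
--     if n == 1:
--         # if each has one, the result is
--         # pretty much predictable as both
--         # have no choice of which blocks to
--         # play with.
--         if a_blocks[0] < b_blocks[0]:
--             result = 0
--         else:
--             result = 1
--     else:
--         # this should produce more interesting results...
--         a_idx = n - 1
--         b_idx = n - 1
--         a_won = 0
--         while a_idx >= 0 and b_idx >= 0:
--             # get last element of naomi blocks
--             a_block = a_blocks[a_idx]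
--             # find b_block that is slightly lower than a_block
--             while b_idx >= 0:
--                 if b_blocks[b_idx] < a_block:
--                     a_won += 1
--                     b_idx -= 1
--                     break
--                 b_idx -= 1
--             a_idx -= 1
--         result = a_won
--     return result
-- ===== SOURCE B (Python) =====
-- def calc_dwar(n, a_blocks, b_blocks):
--     if n == 1:
--         # single block each: Naomi wins unless her block is strictly smaller
--         return 0 if a_blocks[0] < b_blocks[0] else 1
--     # one pass over Ken's blocks from strongest down, consuming Naomi's
--     # blocks (strongest on top of the stack) whenever the current Ken
--     # block loses to Naomi's strongest remaining block
--     m = max(n, 0)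
--     stack = a_blocks[:m]
--     wins = 0
--     for bval in reversed(b_blocks[:m]):
--         if not stack:
--             break
--         if bval < stack[-1]:
--             wins += 1
--             stack.pop()
--     return wins
-- ===== Notes on version B (the rewrite author's own statement) =====
-- stated objective: alternative
-- what changed: Replaces the nested while-loops over descending Int indices (outer over Naomi's blocks, inner rescanning Ken's) by a single forward pass over Ken's reversed prefix that consumes a stack of Naomi's prefix, keeping A's n==1 tie branch.
import Mathlib
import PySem

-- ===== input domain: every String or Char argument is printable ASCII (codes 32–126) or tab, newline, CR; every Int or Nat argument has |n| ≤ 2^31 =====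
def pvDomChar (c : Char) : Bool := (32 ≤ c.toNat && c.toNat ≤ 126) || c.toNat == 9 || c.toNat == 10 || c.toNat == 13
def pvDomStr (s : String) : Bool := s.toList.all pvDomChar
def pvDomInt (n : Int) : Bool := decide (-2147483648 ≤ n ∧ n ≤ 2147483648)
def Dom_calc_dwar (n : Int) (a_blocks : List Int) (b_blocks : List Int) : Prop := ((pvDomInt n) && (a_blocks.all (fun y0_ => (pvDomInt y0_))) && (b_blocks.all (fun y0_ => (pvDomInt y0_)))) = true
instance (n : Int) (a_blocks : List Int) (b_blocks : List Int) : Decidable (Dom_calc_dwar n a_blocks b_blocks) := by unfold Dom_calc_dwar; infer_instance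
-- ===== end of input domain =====

-- B replaces A's nested descending-index while-loops by one forward pass over Ken's
-- reversed prefix consuming a stack of Naomi's prefix (top = last) (alternative decomposition,
-- same cost); A's n==1 tie branch is kept as written.

-- ===== PORT A =====
-- inner 'while b_idx >= 0' loop: returns (new b_idx, whether a win was scored)
def pvInnerA (b : List Int) (a_block : Int) (b_idx : Int) : Int × Bool :=
  if h : 0 ≤ b_idx then
    if (PySem.List.pyGet? b b_idx).getD 0 < a_block then (b_idx - 1, true)
    else pvInnerA b a_block (b_idx - 1)
  else (b_idx, false)
termination_by (b_idx + 1).toNat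
decreasing_by omega

-- outer 'while a_idx >= 0 and b_idx >= 0' loop
def pvOuterA (a b : List Int) (a_idx b_idx a_won : Int) : Int :=
  if h : 0 ≤ a_idx ∧ 0 ≤ b_idx then
    let a_block := (PySem.List.pyGet? a a_idx).getD 0
    let r := pvInnerA b a_block b_idx
    pvOuterA a b (a_idx - 1) r.1 (if r.2 then a_won + 1 else a_won)
  else a_won
termination_by (a_idx + 1).toNat
decreasing_by omega

def calc_dwar (n : Int) (a_blocks : List Int) (b_blocks : List Int) : Int :=
  if n == 1 then
    if (PySem.List.pyGet? a_blocks 0).getD 0 < (PySem.List.pyGet? b_blocks 0).getD 0 then 0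
    else 1
  else pvOuterA a_blocks b_blocks (n - 1) (n - 1) 0

-- ===== PORT B =====
-- the single 'for bval in reversed(b_blocks[:m])' loop of Source B; the stack's top is its
-- last element (stack[-1] / stack.pop())
def pvGoB : List Int → List Int → Int → Int
  | [], _, wins => wins
  | bval :: rest, stack, wins =>
    if stack = [] then wins             -- 'if not stack: break'
    else if bval < (PySem.List.pyGet? stack (-1)).getD 0 then
      pvGoB rest stack.dropLast (wins + 1)
    else pvGoB rest stack wins

def calc_dwar_alt (n : Int) (a_blocks : List Int) (b_blocks : List Int) : Int :=
  if n == 1 then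
    if (PySem.List.pyGet? a_blocks 0).getD 0 < (PySem.List.pyGet? b_blocks 0).getD 0 then 0
    else 1
  else
    let m := max n 0
    let stack := PySem.List.slice a_blocks none (some m)
    let ys := (PySem.List.slice b_blocks none (some m)).reverse
    pvGoB ys stack 0

-- ===== PRECONDITION & SPEC =====
-- Pre_ excludes exactly the inputs on which A raises IndexError: n==1 with an empty
-- list, or 2<=n larger than either list's length.
def Pre_calc_dwar (n : Int) (a_blocks : List Int) (b_blocks : List Int) : Prop :=
  (n = 1 → a_blocks ≠ [] ∧ b_blocks ≠ []) ∧
  (2 ≤ n → n ≤ a_blocks.length ∧ n ≤ b_blocks.length)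
instance (n : Int) (a_blocks : List Int) (b_blocks : List Int) : Decidable (Pre_calc_dwar n a_blocks b_blocks) := by unfold Pre_calc_dwar; infer_instance

def pvWitness_calc_dwar : Int × List Int × List Int := (3, [1, 2, 5], [1, 3, 4])

def Spec_calc_dwar (n : Int) (a_blocks : List Int) (b_blocks : List Int) (out : Int) : Prop := out = calc_dwar_alt n a_blocks b_blocks
instance (n : Int) (a_blocks : List Int) (b_blocks : List Int) (out : Int) : Decidable (Spec_calc_dwar n a_blocks b_blocks out) := by unfold Spec_calc_dwar; infer_instance

-- ===== CLAIM (what is proved, stated in full; the proofs are below) =====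
def Claim_equal_calc_dwar : Prop := ∀ (n : Int) (a_blocks : List Int) (b_blocks : List Int), Dom_calc_dwar n a_blocks b_blocks → Pre_calc_dwar n a_blocks b_blocks → Spec_calc_dwar n a_blocks b_blocks (calc_dwar n a_blocks b_blocks)

-- ===== LEMMAS AND PROOFS =====

-- the reversed prefix l[k], l[k-1], …, l[0] (empty for k < 0)
def pvDesc (l : List Int) (k : Int) : List Int := (l.take (k + 1).toNat).reverse

theorem pvDesc_neg {l : List Int} {k : Int} (h : k < 0) : pvDesc l k = [] := by
  simp [pvDesc, Int.toNat_of_nonpos (by omega : k + 1 ≤ 0)]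

theorem pvDesc_cons {l : List Int} {k : Int} (h0 : 0 ≤ k) (h1 : k.toNat < l.length) :
    pvDesc l k = l[k.toNat] :: pvDesc l (k - 1) := by
  have hk : (k + 1).toNat = k.toNat + 1 := by omega
  have hk' : (k - 1 + 1).toNat = k.toNat := by omega
  rw [pvDesc, pvDesc, hk, hk', List.take_add_one, List.getElem?_eq_getElem h1]
  simp

theorem pvGet_eq {l : List Int} {i : Int} (h0 : 0 ≤ i) (h1 : i.toNat < l.length) :
    (PySem.List.pyGet? l i).getD 0 = l[i.toNat] := by
  simp [PySem.List.pyGet?, PySem.List.pyIdx?, h0, (by omega : i < (l.length : Int))]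

-- proof-side view of B's loop with the stack reversed (top = head)
def pvGoBr : List Int → List Int → Int → Int
  | [], _, wins => wins
  | bval :: rest, rem, wins =>
    match rem with
    | [] => wins
    | x :: rem' =>
      if bval < x then pvGoBr rest rem' (wins + 1)
      else pvGoBr rest (x :: rem') wins

theorem pvGoB_eq_goBr (ys : List Int) :
    ∀ (stack : List Int) (w : Int), pvGoB ys stack w = pvGoBr ys stack.reverse w := by
  induction ys with
  | nil => intro stack w; rfl
  | cons bval rest ih =>
    intro stack w
    rcases List.eq_nil_or_concat stack with h | ⟨init, t, h⟩
    · subst h; rfl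
    · subst h
      simp only [List.concat_eq_append, pvGoB, pvGoBr, List.append_eq_nil_iff,
        List.cons_ne_nil, and_false, if_false,
        PySem.List.pyGet?_neg_one_append_singleton, Option.getD_some,
        List.dropLast_concat, List.reverse_append, List.reverse_cons, List.reverse_nil,
        List.nil_append, List.singleton_append]
      split
      · exact ih init (w + 1)
      · rw [ih (init ++ [t]) w]
        simp

theorem pvGoBr_nil_rem (ys : List Int) (w : Int) : pvGoBr ys [] w = w := by
  cases ys <;> simp [pvGoBr]

theorem pvInnerA_le (b : List Int) (x : Int) (j : Int) : (pvInnerA b x j).1 ≤ j := by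
  generalize hf : (j + 1).toNat = f
  induction f generalizing j with
  | zero => rw [pvInnerA]; rw [dif_neg (by omega : ¬ 0 ≤ j)]
  | succ f ih =>
    rw [pvInnerA]
    by_cases h : 0 ≤ j
    · rw [dif_pos h]
      split
      · simp
      · have := ih (j - 1) (by omega)
        omega
    · rw [dif_neg h]

theorem pvInnerA_false_neg (b : List Int) (x : Int) (j : Int)
    (h : (pvInnerA b x j).2 = false) : (pvInnerA b x j).1 < 0 := by
  generalize hf : (j + 1).toNat = f
  induction f generalizing j with
  | zero => rw [pvInnerA] at h ⊢; rw [dif_neg (by omega : ¬ 0 ≤ j)]; omega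
  | succ f ih =>
    rw [pvInnerA] at h ⊢
    by_cases hj : 0 ≤ j
    · rw [dif_pos hj] at h ⊢
      by_cases hlt : (PySem.List.pyGet? b j).getD 0 < x
      · simp [hlt] at h
      · rw [if_neg hlt] at h ⊢
        exact ih (j - 1) h (by omega)
    · rw [dif_neg hj]; omega

-- one outer step of A = processing Ken's blocks down to the next win in B's pass
theorem pvGoBr_inner (b : List Int) (x : Int) (rem : List Int) (w : Int) :
    ∀ (j : Int), j < (b.length : Int) →
      pvGoBr (pvDesc b j) (x :: rem) w =
        (if (pvInnerA b x j).2 then pvGoBr (pvDesc b (pvInnerA b x j).1) rem (w + 1) else w) := by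
  intro j hj
  generalize hf : (j + 1).toNat = f
  induction f generalizing j with
  | zero =>
    rw [pvDesc_neg (by omega), pvInnerA, dif_neg (by omega : ¬ 0 ≤ j)]
    simp [pvGoBr]
  | succ f ih =>
    by_cases h0 : 0 ≤ j
    · rw [pvDesc_cons h0 (by omega), pvInnerA, dif_pos h0, pvGet_eq h0 (by omega)]
      by_cases hlt : b[j.toNat] < x
      · simp [pvGoBr, hlt]
      · rw [if_neg hlt]
        simp only [pvGoBr, if_neg hlt]
        exact ih (j - 1) (by omega) (by omega)
    · rw [pvDesc_neg (by omega), pvInnerA, dif_neg h0]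
      simp [pvGoBr]

theorem pvOuter_eq_goB (a b : List Int) :
    ∀ (i j w : Int), i < (a.length : Int) → j < (b.length : Int) →
      pvOuterA a b i j w = pvGoBr (pvDesc b j) (pvDesc a i) w := by
  intro i j w hi hj
  generalize hf : (i + 1).toNat = f
  induction f generalizing i j w with
  | zero =>
    rw [pvOuterA, dif_neg (by omega : ¬ (0 ≤ i ∧ 0 ≤ j)), pvDesc_neg (by omega : i < 0),
        pvGoBr_nil_rem]
  | succ f ih =>
    by_cases h0 : 0 ≤ i
    · by_cases hj0 : 0 ≤ j
      · rw [pvOuterA, dif_pos ⟨h0, hj0⟩, pvDesc_cons h0 (by omega),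
            pvGet_eq h0 (by omega)]
        rw [pvGoBr_inner b _ _ w j hj]
        show pvOuterA a b (i - 1) (pvInnerA b a[i.toNat] j).1
              (if (pvInnerA b a[i.toNat] j).2 then w + 1 else w) = _
        by_cases h2 : (pvInnerA b a[i.toNat] j).2
        · rw [if_pos h2, if_pos h2]
          have hle := pvInnerA_le b a[i.toNat] j
          exact ih (i - 1) _ (w + 1) (by omega) (by omega) (by omega)
        · rw [if_neg h2, if_neg h2, pvOuterA]
          have hneg := pvInnerA_false_neg b a[i.toNat] j (Bool.eq_false_iff.mpr h2)
          rw [dif_neg (by omega : ¬ (0 ≤ i - 1 ∧ 0 ≤ (pvInnerA b a[i.toNat] j).1))]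
      · rw [pvOuterA, dif_neg (by omega : ¬ (0 ≤ i ∧ 0 ≤ j)), pvDesc_neg (by omega : j < 0)]
        simp [pvGoBr]
    · rw [pvOuterA, dif_neg (by omega : ¬ (0 ≤ i ∧ 0 ≤ j)), pvDesc_neg (by omega : i < 0),
          pvGoBr_nil_rem]

-- ===== VERDICT (by name: the statement is the Claim_ definition above) =====
theorem calc_dwar_spec : Claim_equal_calc_dwar := by
  intro n a b _ hpre
  unfold Spec_calc_dwar calc_dwar calc_dwar_alt
  by_cases h1 : n = 1
  · simp [h1]
  · simp only [beq_iff_eq, if_neg h1]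
    by_cases h2 : 2 ≤ n
    · obtain ⟨ha, hb⟩ := hpre.2 h2
      have hm : max n 0 = n := by omega
      rw [hm, PySem.List.slice_to a (by omega), PySem.List.slice_to b (by omega),
          pvGoB_eq_goBr]
      have hda : (a.take n.toNat).reverse = pvDesc a (n - 1) := by
        rw [pvDesc]; congr 2; omega
      have hdb : (b.take n.toNat).reverse = pvDesc b (n - 1) := by
        rw [pvDesc]; congr 2; omega
      rw [hda, hdb]
      exact pvOuter_eq_goB a b (n - 1) (n - 1) 0 (by omega) (by omega)
    · -- n ≤ 0: both sides compute 0
      have hm : max n 0 = 0 := by omega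
      rw [hm, PySem.List.slice_to a (le_refl 0), PySem.List.slice_to b (le_refl 0), pvOuterA,
          dif_neg (by omega : ¬ (0 ≤ n - 1 ∧ 0 ≤ n - 1))]
      rfl
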